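-- pv_equiv track=rewrite | github.com/iamkissg/nowcoder | campus/昆仑万维/submitted_2.py | max_length_in_tree
-- ===== SOURCE A (Python) =====
-- def max_length_in_tree(root):
--     if not root or len(root) < 2:
--         return 0
--
--     n = len(root)
--     l, r = 1, 3
--     left_depth, right_depth = 0, 0
--     while l < n:
--         mid = l + (r-l) // 2
--         if any(a!=-1 for a in root[l: mid]):
--             left_depth += 1
--         if any(a!=-1 for a in root[mid: r]):
--             right_depth += 1
--         l, r = r, r*2+1
--     return left_depth + right_depth
-- ===== SOURCE B (Python) =====
-- def max_length_in_tree(root):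
--     if not root or len(root) < 2:
--         return 0
--     left_levels, right_levels = set(), set()
--     for i in range(1, len(root)):
--         if root[i] != -1:
--             k = (i + 1).bit_length() - 1
--             if i - (2 ** k - 1) < 2 ** (k - 1):
--                 left_levels.add(k)
--             else:
--                 right_levels.add(k)
--     return len(left_levels) + len(right_levels)
-- ===== Notes on version B (the rewrite author's own statement) =====
-- stated objective: alternative
-- what changed: Replaced the per-level while-loop that slices each level into halves with a single pass over indices 1..n-1 that computes each index's level via bit_length and records levels with a non-(-1) node in a left-levels and a right-levels set.
import Mathlib
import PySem

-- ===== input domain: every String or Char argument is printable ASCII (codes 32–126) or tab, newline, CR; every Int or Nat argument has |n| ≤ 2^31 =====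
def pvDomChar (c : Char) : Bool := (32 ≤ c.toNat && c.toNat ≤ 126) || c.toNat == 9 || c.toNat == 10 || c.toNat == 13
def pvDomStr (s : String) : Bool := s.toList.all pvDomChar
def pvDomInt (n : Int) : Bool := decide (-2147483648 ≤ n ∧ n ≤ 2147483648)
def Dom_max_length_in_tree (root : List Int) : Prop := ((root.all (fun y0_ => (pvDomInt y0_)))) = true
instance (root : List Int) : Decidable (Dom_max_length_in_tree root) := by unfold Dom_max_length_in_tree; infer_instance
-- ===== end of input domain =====

-- B replaces A's per-level while-loop over slices by one pass over the indices, classifying each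
-- index by its bit_length-derived level into a left-levels / right-levels set (objective: alternative).

-- ===== PORT A =====
-- the while-loop of A: l, r, left_depth, right_depth; the 'l < r' guard only ensures termination
-- (it holds on every reachable state, since r = 2*l + 1 throughout)
def pvLoopA (root : List Int) (n l r ld rd : Int) : Int :=
  if _h : l < n then
    if _hr : l < r then
      let mid := l + PySem.Int.floordiv (r - l) 2
      let ld' := if (PySem.List.slice root (some l) (some mid)).any (fun a => a != -1) then ld + 1 else ld
      let rd' := if (PySem.List.slice root (some mid) (some r)).any (fun a => a != -1) then rd + 1 else rd
      pvLoopA root n r (r * 2 + 1) ld' rd'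
    else ld + rd
  else ld + rd
termination_by (n - l).toNat
decreasing_by omega

def max_length_in_tree (root : List Int) : Int :=
  if root = [] ∨ (root.length : Int) < 2 then 0
  else pvLoopA root root.length 1 3 0 0

-- ===== PORT B =====
-- body of B's for-loop: classify index i by level k = (i+1).bit_length()-1 into left/right level set
def pvStepB (root : List Int) (st : PySem.Set Int × PySem.Set Int) (i : Int) :
    PySem.Set Int × PySem.Set Int :=
  if PySem.List.pyGetD root i 0 != -1 then
    let k := PySem.Int.bitLength (i + 1) - 1
    if i - (2 ^ k - 1) < 2 ^ (k - 1) then (PySem.Set.add st.1 (k : Int), st.2)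
    else (st.1, PySem.Set.add st.2 (k : Int))
  else st

def max_length_in_tree_alt (root : List Int) : Int :=
  if root = [] ∨ (root.length : Int) < 2 then 0
  else
    let st := (PySem.List.pyRange 1 (root.length : Int) 1).foldl (pvStepB root)
      ((PySem.Set.empty : PySem.Set Int), (PySem.Set.empty : PySem.Set Int))
    (st.1.length : Int) + (st.2.length : Int)

-- ===== PRECONDITION & SPEC =====
def Spec_max_length_in_tree (root : List Int) (out : Int) : Prop := out = max_length_in_tree_alt root
instance (root : List Int) (out : Int) : Decidable (Spec_max_length_in_tree root out) := by unfold Spec_max_length_in_tree; infer_instance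

-- ===== CLAIM (what is proved, stated in full; the proofs are below) =====
def Claim_equal_max_length_in_tree : Prop := ∀ (root : List Int), Dom_max_length_in_tree root → Spec_max_length_in_tree root (max_length_in_tree root)

-- ===== LEMMAS AND PROOFS =====

-- level-t start index, as an integer: 2^t - 1
def pvL (t : Nat) : Int := 2 ^ t - 1

-- "index i holds a non-(-1) node and lies in the left half of its level"
def pvQL (root : List Int) (i : Int) : Bool :=
  (PySem.List.pyGetD root i 0 != -1) &&
    decide (i - (2 ^ (PySem.Int.bitLength (i + 1) - 1) - 1) < 2 ^ (PySem.Int.bitLength (i + 1) - 1 - 1))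

-- "index i holds a non-(-1) node and lies in the right half of its level"
def pvQR (root : List Int) (i : Int) : Bool :=
  (PySem.List.pyGetD root i 0 != -1) &&
    !(decide (i - (2 ^ (PySem.Int.bitLength (i + 1) - 1) - 1) < 2 ^ (PySem.Int.bitLength (i + 1) - 1 - 1)))

-- the indices of level t that exist in root
def pvBlock (root : List Int) (t : Nat) : List Int :=
  PySem.List.pyRange (pvL t) (min (pvL (t + 1)) (root.length : Int)) 1

-- common recursive count: levels from t upward, each contributing a left-half and a right-half bit
def pvCnt (root : List Int) (t : Nat) : Int :=
  if _h : 2 ^ t - 1 < root.length then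
    (if (pvBlock root t).any (pvQL root) then 1 else 0)
    + (if (pvBlock root t).any (pvQR root) then 1 else 0)
    + pvCnt root (t + 1)
  else 0
termination_by root.length - (2 ^ t - 1)
decreasing_by
  have h1 : 1 ≤ 2 ^ t := Nat.one_le_two_pow
  omega

-- bit_length characterisation: indices of level t have (i+1).bit_length() = t+1
lemma pvK (t : Nat) (i : Int) (h1 : pvL t ≤ i) (h2 : i < pvL (t + 1)) :
    PySem.Int.bitLength (i + 1) = t + 1 := by
  set m := i + 1 with hm
  set b := PySem.Int.bitLength m with hb
  have hp : ((2 ^ t : Nat) : Int) = (2 : Int) ^ t := by push_cast; ring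
  have hp1 : ((2 ^ (t + 1) : Nat) : Int) = (2 : Int) ^ (t + 1) := by push_cast; ring
  have hpos : (0 : Int) < m := by
    have : (1 : Nat) ≤ 2 ^ t := Nat.one_le_two_pow
    simp only [pvL] at h1
    omega
  have hlo : (2 ^ t : Nat) ≤ m.natAbs := by
    simp only [pvL] at h1
    omega
  have hhi : m.natAbs < 2 ^ (t + 1) := by
    simp only [pvL] at h2
    omega
  have hA : m.natAbs < 2 ^ b := PySem.Int.lt_two_pow_bitLength m
  have hB : 2 ^ (b - 1) ≤ m.natAbs := PySem.Int.two_pow_bitLength_le m (by omega)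
  have htb : t < b := by
    have : (2 : Nat) ^ t < 2 ^ b := lt_of_le_of_lt hlo hA
    exact (Nat.pow_lt_pow_iff_right (by omega)).mp this
  have hbt : b - 1 < t + 1 := by
    have : (2 : Nat) ^ (b - 1) < 2 ^ (t + 1) := lt_of_le_of_lt hB hhi
    exact (Nat.pow_lt_pow_iff_right (by omega)).mp this
  omega

-- a clipped half-slice has a non-(-1) node iff an existing index of that index range has one
lemma pvAnyTake (root : List Int) (a b : Nat) :
    ((root.drop a).take (b - a)).any (fun x => x != -1) = true ↔
    ∃ j : Nat, a ≤ j ∧ j < b ∧ j < root.length ∧ root.getD j 0 ≠ -1 := by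
  rw [List.any_eq_true]
  constructor
  · rintro ⟨x, hx, hp⟩
    rw [List.mem_iff_getElem] at hx
    obtain ⟨j, hj, hxe⟩ := hx
    have hjl : j < b - a ∧ a + j < root.length := by
      simp [List.length_take, List.length_drop] at hj
      omega
    refine ⟨a + j, by omega, by omega, hjl.2, ?_⟩
    have : ((root.drop a).take (b - a))[j] = root[a + j]'(hjl.2) := by
      rw [List.getElem_take, List.getElem_drop]
    rw [this] at hxe
    rw [List.getD_eq_getElem root 0 hjl.2, hxe]
    simpa using hp
  · rintro ⟨j, haj, hjb, hjl, hne⟩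
    refine ⟨root[j]'hjl, ?_, by simpa using (List.getD_eq_getElem root 0 hjl ▸ hne)⟩
    rw [List.mem_iff_getElem]
    have hlen : j - a < ((root.drop a).take (b - a)).length := by
      simp [List.length_take, List.length_drop]; omega
    refine ⟨j - a, hlen, ?_⟩
    rw [List.getElem_take, List.getElem_drop]
    congr 1; omega

-- some level-t index in the left half exists and is non-(-1)
lemma pvBlockAnyL (root : List Int) (t : Nat) (ht : 1 ≤ t) :
    (pvBlock root t).any (pvQL root) = true ↔
    ∃ j : Nat, 2 ^ t - 1 ≤ j ∧ j < 2 ^ t - 1 + 2 ^ (t - 1) ∧ j < root.length ∧ root.getD j 0 ≠ -1 := by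
  have c1 : ((2 ^ t : Nat) : Int) = (2 : Int) ^ t := by push_cast; ring
  have c3 : ((2 ^ (t - 1) : Nat) : Int) = (2 : Int) ^ (t - 1) := by push_cast; ring
  have c4 : (2 : Int) ^ t = 2 ^ (t - 1) + 2 ^ (t - 1) := by
    have hp := pow_succ (2 : Int) (t - 1)
    have h : t - 1 + 1 = t := by omega
    rw [h] at hp; omega
  have c5 : (2 : Nat) ^ t = 2 ^ (t - 1) + 2 ^ (t - 1) := by
    have hp := pow_succ (2 : Nat) (t - 1)
    have h : t - 1 + 1 = t := by omega
    rw [h] at hp; omega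
  have c6 : (2 : Nat) ^ (t + 1) = 2 ^ t + 2 ^ t := by ring
  have c7 : (2 : Int) ^ (t + 1) = 2 ^ t + 2 ^ t := by ring
  have c8 : (1 : Nat) ≤ 2 ^ (t - 1) := Nat.one_le_two_pow
  rw [List.any_eq_true]
  constructor
  · rintro ⟨i, hi, hq⟩
    rw [pvBlock, PySem.List.mem_pyRange_one] at hi
    obtain ⟨hlo, hhi⟩ := hi
    have hb1 : i < pvL (t + 1) := lt_of_lt_of_le hhi (min_le_left _ _)
    have hb2 : i < (root.length : Int) := lt_of_lt_of_le hhi (min_le_right _ _)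
    have hk := pvK t i hlo hb1
    have h0 : 0 ≤ i := by simp only [pvL] at hlo; have : (1 : Nat) ≤ 2 ^ t := Nat.one_le_two_pow; omega
    rw [pvQL, hk, PySem.List.pyGetD_of_nonneg root 0 h0] at hq
    simp only [Nat.add_sub_cancel, Bool.and_eq_true, bne_iff_ne, ne_eq, decide_eq_true_eq] at hq
    refine ⟨i.toNat, ?_, ?_, by omega, hq.1⟩
    · simp only [pvL] at hlo; omega
    · have := hq.2; simp only [pvL] at hlo hb1; omega
  · rintro ⟨j, hj1, hj2, hj3, hne⟩
    refine ⟨(j : Int), ?_, ?_⟩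
    · rw [pvBlock, PySem.List.mem_pyRange_one]
      constructor
      · simp only [pvL]; omega
      · have h2 : ((j : Int)) < pvL (t + 1) := by simp only [pvL]; omega
        exact lt_min h2 (by exact_mod_cast hj3)
    · have hlo : pvL t ≤ (j : Int) := by simp only [pvL]; omega
      have hb1 : (j : Int) < pvL (t + 1) := by simp only [pvL]; omega
      have hk := pvK t _ hlo hb1
      rw [pvQL, hk, PySem.List.pyGetD_of_nonneg root 0 (by positivity)]
      simp only [Nat.add_sub_cancel, Bool.and_eq_true, bne_iff_ne, ne_eq, decide_eq_true_eq]
      exact ⟨by simpa using hne, by omega⟩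

-- some level-t index in the right half exists and is non-(-1)
lemma pvBlockAnyR (root : List Int) (t : Nat) (ht : 1 ≤ t) :
    (pvBlock root t).any (pvQR root) = true ↔
    ∃ j : Nat, 2 ^ t - 1 + 2 ^ (t - 1) ≤ j ∧ j < 2 ^ (t + 1) - 1 ∧ j < root.length ∧ root.getD j 0 ≠ -1 := by
  have c1 : ((2 ^ t : Nat) : Int) = (2 : Int) ^ t := by push_cast; ring
  have c3 : ((2 ^ (t - 1) : Nat) : Int) = (2 : Int) ^ (t - 1) := by push_cast; ring
  have c4 : (2 : Int) ^ t = 2 ^ (t - 1) + 2 ^ (t - 1) := by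
    have hp := pow_succ (2 : Int) (t - 1)
    have h : t - 1 + 1 = t := by omega
    rw [h] at hp; omega
  have c5 : (2 : Nat) ^ t = 2 ^ (t - 1) + 2 ^ (t - 1) := by
    have hp := pow_succ (2 : Nat) (t - 1)
    have h : t - 1 + 1 = t := by omega
    rw [h] at hp; omega
  have c6 : (2 : Nat) ^ (t + 1) = 2 ^ t + 2 ^ t := by ring
  have c7 : (2 : Int) ^ (t + 1) = 2 ^ t + 2 ^ t := by ring
  have c8 : (1 : Nat) ≤ 2 ^ (t - 1) := Nat.one_le_two_pow
  rw [List.any_eq_true]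
  constructor
  · rintro ⟨i, hi, hq⟩
    rw [pvBlock, PySem.List.mem_pyRange_one] at hi
    obtain ⟨hlo, hhi⟩ := hi
    have hb1 : i < pvL (t + 1) := lt_of_lt_of_le hhi (min_le_left _ _)
    have hb2 : i < (root.length : Int) := lt_of_lt_of_le hhi (min_le_right _ _)
    have hk := pvK t i hlo hb1
    have h0 : 0 ≤ i := by simp only [pvL] at hlo; have : (1 : Nat) ≤ 2 ^ t := Nat.one_le_two_pow; omega
    rw [pvQR, hk, PySem.List.pyGetD_of_nonneg root 0 h0] at hq
    simp only [Nat.add_sub_cancel, Bool.and_eq_true, bne_iff_ne, ne_eq, Bool.not_eq_true',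
      decide_eq_false_iff_not, not_lt] at hq
    refine ⟨i.toNat, ?_, ?_, by omega, hq.1⟩
    · have := hq.2; simp only [pvL] at hlo; omega
    · simp only [pvL] at hb1; have : (1 : Nat) ≤ 2 ^ t := Nat.one_le_two_pow; omega
  · rintro ⟨j, hj1, hj2, hj3, hne⟩
    refine ⟨(j : Int), ?_, ?_⟩
    · rw [pvBlock, PySem.List.mem_pyRange_one]
      constructor
      · simp only [pvL]; omega
      · have h2 : ((j : Int)) < pvL (t + 1) := by simp only [pvL]; omega
        exact lt_min h2 (by exact_mod_cast hj3)
    · have hlo : pvL t ≤ (j : Int) := by simp only [pvL]; omega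
      have hb1 : (j : Int) < pvL (t + 1) := by simp only [pvL]; omega
      have hk := pvK t _ hlo hb1
      rw [pvQR, hk, PySem.List.pyGetD_of_nonneg root 0 (by positivity)]
      simp only [Nat.add_sub_cancel, Bool.and_eq_true, bne_iff_ne, ne_eq, Bool.not_eq_true',
        decide_eq_false_iff_not, not_lt]
      exact ⟨by simpa using hne, by omega⟩

-- folding B's step over a list of level-t indices adds t to the matching side-sets
lemma pvFoldBlock (root : List Int) (t : Nat) :
    ∀ (xs : List Int), (∀ i ∈ xs, pvL t ≤ i ∧ i < pvL (t + 1)) →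
    ∀ s1 s2 : PySem.Set Int,
      xs.foldl (pvStepB root) (s1, s2) =
        ((if xs.any (pvQL root) then PySem.Set.add s1 (t : Int) else s1),
         (if xs.any (pvQR root) then PySem.Set.add s2 (t : Int) else s2)) := by
  intro xs
  induction xs with
  | nil => intro _ s1 s2; simp
  | cons i xs ih =>
    intro hb s1 s2
    have hbi := hb i (List.mem_cons_self ..)
    have hk := pvK t i hbi.1 hbi.2
    have hrest : ∀ j ∈ xs, pvL t ≤ j ∧ j < pvL (t + 1) := fun j hj => hb j (List.mem_cons_of_mem _ hj)
    simp only [List.foldl_cons, List.any_cons]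
    have hQL : pvQL root i = ((PySem.List.pyGetD root i 0 != -1) && decide (i - (2 ^ t - 1) < 2 ^ (t - 1))) := by
      rw [pvQL, hk]; simp
    have hQR : pvQR root i = ((PySem.List.pyGetD root i 0 != -1) && !(decide (i - (2 ^ t - 1) < 2 ^ (t - 1)))) := by
      rw [pvQR, hk]; simp
    have hstep : pvStepB root (s1, s2) i =
        (if (pvQL root i) then (PySem.Set.add s1 (t : Int), s2)
         else if (pvQR root i) then (s1, PySem.Set.add s2 (t : Int)) else (s1, s2)) := by
      rw [pvStepB, hk, hQL, hQR]
      simp only [Nat.add_sub_cancel]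
      cases hg : (PySem.List.pyGetD root i 0 != -1) with
      | false => simp
      | true =>
        simp only [Bool.true_and, if_true]
        by_cases hc : i - (2 ^ t - 1) < 2 ^ (t - 1) <;> simp [hc]
    rw [hstep]
    by_cases hql : pvQL root i = true
    · have hqr : pvQR root i = false := by
        rw [hQL] at hql; rw [hQR]
        rcases Bool.and_eq_true _ _ |>.mp hql with ⟨h1, h2⟩
        simp [h1, h2]
      simp only [hql, if_true, hqr, Bool.false_or, Bool.true_or]
      rw [ih hrest]
      by_cases h1 : xs.any (pvQL root) = true <;> simp [h1]
    · have hql' : pvQL root i = false := by simpa using hql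
      by_cases hqr : pvQR root i = true
      · simp only [hql', hqr, if_true, Bool.false_or, Bool.true_or]
        rw [ih hrest]
        by_cases h2 : xs.any (pvQR root) = true <;> simp [h2]
      · have hqr' : pvQR root i = false := by simpa using hqr
        simp only [hql', hqr', Bool.false_or]
        exact ih hrest s1 s2

-- A's loop from level t computes pvCnt
lemma pvLoopA_eq (root : List Int) :
    ∀ (N t : Nat), 1 ≤ t → root.length - (2 ^ t - 1) ≤ N →
    ∀ ld rd : Int,
      pvLoopA root (root.length : Int) (pvL t) (pvL (t + 1)) ld rd = ld + rd + pvCnt root t := by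
  intro N
  induction N with
  | zero =>
    intro t ht hN ld rd
    have h : ¬ (2 ^ t - 1 < root.length) := by omega
    have hI : ¬ (pvL t < (root.length : Int)) := by
      simp only [pvL]
      have c1 : ((2 ^ t : Nat) : Int) = (2 : Int) ^ t := by push_cast; ring
      have h1 : (1 : Nat) ≤ 2 ^ t := Nat.one_le_two_pow
      omega
    rw [pvLoopA, dif_neg hI, pvCnt, dif_neg h]
    ring
  | succ N ih =>
    intro t ht hN ld rd
    by_cases h : 2 ^ t - 1 < root.length
    · have c1 : ((2 ^ t : Nat) : Int) = (2 : Int) ^ t := by push_cast; ring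
      have c2 : ((2 ^ (t + 1) : Nat) : Int) = (2 : Int) ^ (t + 1) := by push_cast; ring
      have c3 : ((2 ^ (t - 1) : Nat) : Int) = (2 : Int) ^ (t - 1) := by push_cast; ring
      have c5 : (2 : Nat) ^ t = 2 ^ (t - 1) + 2 ^ (t - 1) := by
        have hp := pow_succ (2 : Nat) (t - 1)
        have he : t - 1 + 1 = t := by omega
        rw [he] at hp; omega
      have c6 : (2 : Nat) ^ (t + 1) = 2 ^ t + 2 ^ t := by ring
      have c7 : (2 : Int) ^ (t + 1) = 2 ^ t + 2 ^ t := by ring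
      have c8 : (1 : Nat) ≤ 2 ^ (t - 1) := Nat.one_le_two_pow
      have c9 : (2 : Nat) ^ (t + 2) = 2 ^ (t + 1) + 2 ^ (t + 1) := by ring
      have c10 : ((2 ^ (t + 2) : Nat) : Int) = (2 : Int) ^ (t + 2) := by push_cast; ring
      have hI : pvL t < (root.length : Int) := by simp only [pvL]; omega
      have hlr : pvL t < pvL (t + 1) := by simp only [pvL]; omega
      have ha : pvL t = ((2 ^ t - 1 : Nat) : Int) := by simp only [pvL]; omega
      have hr : pvL (t + 1) = ((2 ^ (t + 1) - 1 : Nat) : Int) := by simp only [pvL]; omega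
      have hmid : pvL t + PySem.Int.floordiv (pvL (t + 1) - pvL t) 2 = ((2 ^ t - 1 + 2 ^ (t - 1) : Nat) : Int) := by
        have h1 : pvL (t + 1) - pvL t = ((2 ^ t : Nat) : Int) := by simp only [pvL]; omega
        have h2 : (2 : Int) = ((2 : Nat) : Int) := by norm_cast
        rw [h1, h2, PySem.Int.floordiv_natCast]
        have h3 : (2 ^ t / 2 : Nat) = 2 ^ (t - 1) := by omega
        rw [h3]
        simp only [pvL]; omega
      rw [pvLoopA, dif_pos hI, dif_pos hlr, hmid]
      simp only [ha, hr, PySem.List.slice_natCast]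
      have hnext : pvL (t + 1) * 2 + 1 = pvL (t + 2) := by simp only [pvL]; omega
      have hr' : ((2 ^ (t + 1) - 1 : Nat) : Int) = pvL (t + 1) := hr.symm
      rw [hr', hnext]
      rw [ih (t + 1) (by omega) (by omega)]
      have eL : ((root.drop (2 ^ t - 1)).take ((2 ^ t - 1 + 2 ^ (t - 1)) - (2 ^ t - 1))).any (fun a => a != -1)
          = (pvBlock root t).any (pvQL root) :=
        Bool.coe_iff_coe.mp ((pvAnyTake root (2 ^ t - 1) (2 ^ t - 1 + 2 ^ (t - 1))).trans (pvBlockAnyL root t ht).symm)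
      have eR : ((root.drop (2 ^ t - 1 + 2 ^ (t - 1))).take ((2 ^ (t + 1) - 1) - (2 ^ t - 1 + 2 ^ (t - 1)))).any (fun a => a != -1)
          = (pvBlock root t).any (pvQR root) :=
        Bool.coe_iff_coe.mp ((pvAnyTake root (2 ^ t - 1 + 2 ^ (t - 1)) (2 ^ (t + 1) - 1)).trans (pvBlockAnyR root t ht).symm)
      rw [eL, eR]
      conv_rhs => rw [pvCnt]
      rw [dif_pos h]
      split_ifs <;> ring
    · have hI : ¬ (pvL t < (root.length : Int)) := by
        simp only [pvL]
        have c1 : ((2 ^ t : Nat) : Int) = (2 : Int) ^ t := by push_cast; ring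
        have h1 : (1 : Nat) ≤ 2 ^ t := Nat.one_le_two_pow
        omega
      rw [pvLoopA, dif_neg hI, pvCnt, dif_neg h]
      ring

-- B's fold from level t adds pvCnt many elements across the two side-sets
lemma pvFoldB_eq (root : List Int) :
    ∀ (N t : Nat), 1 ≤ t → root.length - (2 ^ t - 1) ≤ N →
    ∀ s1 s2 : PySem.Set Int, (∀ x ∈ s1, x < (t : Int)) → (∀ x ∈ s2, x < (t : Int)) →
      ((((PySem.List.pyRange (pvL t) (root.length : Int) 1).foldl (pvStepB root) (s1, s2)).1.length : Int)
        + (((PySem.List.pyRange (pvL t) (root.length : Int) 1).foldl (pvStepB root) (s1, s2)).2.length : Int))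
      = (s1.length : Int) + (s2.length : Int) + pvCnt root t := by
  intro N
  induction N with
  | zero =>
    intro t ht hN s1 s2 hs1 hs2
    have h : ¬ (2 ^ t - 1 < root.length) := by omega
    have hI : (root.length : Int) ≤ pvL t := by
      simp only [pvL]
      have c1 : ((2 ^ t : Nat) : Int) = (2 : Int) ^ t := by push_cast; ring
      have h1 : (1 : Nat) ≤ 2 ^ t := Nat.one_le_two_pow
      omega
    rw [PySem.List.pyRange_one_eq_nil hI, List.foldl_nil, pvCnt, dif_neg h]
    ring
  | succ N ih =>
    intro t ht hN s1 s2 hs1 hs2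
    by_cases h : 2 ^ t - 1 < root.length
    · have c1 : ((2 ^ t : Nat) : Int) = (2 : Int) ^ t := by push_cast; ring
      have c6 : (2 : Nat) ^ (t + 1) = 2 ^ t + 2 ^ t := by ring
      have c7 : (2 : Int) ^ (t + 1) = 2 ^ t + 2 ^ t := by ring
      have c2 : ((2 ^ (t + 1) : Nat) : Int) = (2 : Int) ^ (t + 1) := by push_cast; ring
      have h1 : (1 : Nat) ≤ 2 ^ t := Nat.one_le_two_pow
      have hl1 : pvL t ≤ pvL (t + 1) := by simp only [pvL]; omega
      have hsplit : PySem.List.pyRange (pvL t) (root.length : Int) 1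
          = pvBlock root t ++ PySem.List.pyRange (pvL (t + 1)) (root.length : Int) 1 := by
        by_cases hc : pvL (t + 1) ≤ (root.length : Int)
        · rw [pvBlock, min_eq_left hc]
          exact PySem.List.pyRange_one_append _ _ _ hl1 hc
        · have hc' : (root.length : Int) ≤ pvL (t + 1) := le_of_not_ge hc
          rw [pvBlock, min_eq_right hc', PySem.List.pyRange_one_eq_nil hc', List.append_nil]
      have hbounds : ∀ i ∈ pvBlock root t, pvL t ≤ i ∧ i < pvL (t + 1) := by
        intro i hi
        rw [pvBlock, PySem.List.mem_pyRange_one] at hi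
        exact ⟨hi.1, lt_of_lt_of_le hi.2 (min_le_left _ _)⟩
      rw [hsplit, List.foldl_append, pvFoldBlock root t (pvBlock root t) hbounds s1 s2]
      have hnm1 : ((t : Nat) : Int) ∉ s1 := fun hm => absurd (hs1 _ hm) (by omega)
      have hnm2 : ((t : Nat) : Int) ∉ s2 := fun hm => absurd (hs2 _ hm) (by omega)
      have hc1 : ∀ x ∈ (if (pvBlock root t).any (pvQL root) then PySem.Set.add s1 (t : Int) else s1),
          x < ((t + 1 : Nat) : Int) := by
        intro x hx
        split_ifs at hx with hq
        · rcases (PySem.Set.mem_add _ _ _).mp hx with hx' | hx'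
          · have := hs1 _ hx'; push_cast; omega
          · push_cast; omega
        · have := hs1 _ hx; push_cast; omega
      have hc2 : ∀ x ∈ (if (pvBlock root t).any (pvQR root) then PySem.Set.add s2 (t : Int) else s2),
          x < ((t + 1 : Nat) : Int) := by
        intro x hx
        split_ifs at hx with hq
        · rcases (PySem.Set.mem_add _ _ _).mp hx with hx' | hx'
          · have := hs2 _ hx'; push_cast; omega
          · push_cast; omega
        · have := hs2 _ hx; push_cast; omega
      rw [ih (t + 1) (by omega) (by omega) _ _ hc1 hc2]
      have hlen1 : (((if (pvBlock root t).any (pvQL root) then PySem.Set.add s1 (t : Int) else s1)).length : Int)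
          = (s1.length : Int) + (if (pvBlock root t).any (pvQL root) then 1 else 0) := by
        split_ifs with hq
        · rw [PySem.Set.add_of_not_mem hnm1]; simp
        · ring
      have hlen2 : (((if (pvBlock root t).any (pvQR root) then PySem.Set.add s2 (t : Int) else s2)).length : Int)
          = (s2.length : Int) + (if (pvBlock root t).any (pvQR root) then 1 else 0) := by
        split_ifs with hq
        · rw [PySem.Set.add_of_not_mem hnm2]; simp
        · ring
      rw [hlen1, hlen2]
      conv_rhs => rw [pvCnt]
      rw [dif_pos h]
      split_ifs <;> ring
    · have hI : (root.length : Int) ≤ pvL t := by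
        simp only [pvL]
        have c1 : ((2 ^ t : Nat) : Int) = (2 : Int) ^ t := by push_cast; ring
        have h1 : (1 : Nat) ≤ 2 ^ t := Nat.one_le_two_pow
        omega
      rw [PySem.List.pyRange_one_eq_nil hI, List.foldl_nil, pvCnt, dif_neg h]
      ring

-- ===== VERDICT (by name: the statement is the Claim_ definition above) =====
theorem max_length_in_tree_spec : Claim_equal_max_length_in_tree := by
  intro root _dom
  unfold Spec_max_length_in_tree max_length_in_tree max_length_in_tree_alt
  by_cases hsm : root = [] ∨ (root.length : Int) < 2
  · rw [if_pos hsm, if_pos hsm]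
  · rw [if_neg hsm, if_neg hsm]
    have hlen : 2 ≤ root.length := by
      rcases not_or.mp hsm with ⟨h1, h2⟩
      have : root.length ≠ 0 := by simpa [List.length_eq_zero_iff] using h1
      omega
    have hA := pvLoopA_eq root root.length 1 (by omega) (by omega) 0 0
    have hB := pvFoldB_eq root root.length 1 (by omega) (by omega)
      PySem.Set.empty PySem.Set.empty (by intro x hx; simp [PySem.Set.empty] at hx)
      (by intro x hx; simp [PySem.Set.empty] at hx)
    have e1 : pvL 1 = (1 : Int) := by simp [pvL]
    have e2 : pvL 2 = (3 : Int) := by norm_num [pvL]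
    rw [e1] at hA hB
    rw [e2] at hA
    rw [hA, hB]
    simp [PySem.Set.empty]
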